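-- pv_equiv track=rewrite | github.com/vipul-maheshwari/saarthi-ner | postprocessing/time_utils.py | filter_dates
-- ===== SOURCE A (Python) =====
-- def filter_dates(dates_list):
--     valid_list = []
--     for dates in dates_list:
--         if dates[0] != 'No pattern found' and dates[0] != "Invalid date":
--             valid_list.append(dates)
--
--     m = -1000000000
--     response = []
--
--     for dates in valid_list:
--         if dates[1] > m:
--             m = dates[1]
--             response = [dates[0]]
--         elif dates[1] == m:
--             m = dates[1]
--             response.append(dates[0])
--
--     if len(response) == 0:
--         return None, -1
--     return min(response), m
-- ===== SOURCE B (Python) =====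
-- def filter_dates(dates_list):
--     valid = [d for d in dates_list
--              if d[0] != 'No pattern found' and d[0] != 'Invalid date']
--     if not valid:
--         return None, -1
--     m = max(s for _, s in valid)
--     return min(n for n, s in valid if s == m), m
-- ===== Notes on version B (the rewrite author's own statement) =====
-- stated objective: simpler
-- what changed: Replaces A's single running-max loop that rebuilds/extends a candidate list with a two-pass decomposition: compute the max score over the valid entries, then take the lexicographic min of the names attaining it; the empty valid list is guarded explicitly.
-- intended difference: When the valid list is non-empty but every valid score is strictly below A's sentinel -1000000000, A's running max never fires and it returns (None, -1) as if nothing were valid, while B returns the true (min name with max score, max score), which is the intended selection. — e.g. on filter_dates([("a", -2000000000)]): A returns (none, -1), B returns (some "a", -2000000000)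
import Mathlib
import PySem

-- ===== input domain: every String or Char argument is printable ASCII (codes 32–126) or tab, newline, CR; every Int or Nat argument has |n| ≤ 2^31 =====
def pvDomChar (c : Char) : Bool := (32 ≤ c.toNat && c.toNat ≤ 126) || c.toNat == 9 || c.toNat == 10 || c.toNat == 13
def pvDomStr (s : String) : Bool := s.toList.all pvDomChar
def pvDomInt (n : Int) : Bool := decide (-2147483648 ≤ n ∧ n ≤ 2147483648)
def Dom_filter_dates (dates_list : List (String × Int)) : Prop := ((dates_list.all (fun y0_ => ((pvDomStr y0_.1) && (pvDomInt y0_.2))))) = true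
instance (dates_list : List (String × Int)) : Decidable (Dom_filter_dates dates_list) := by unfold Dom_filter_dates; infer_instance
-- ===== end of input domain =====

-- B replaces A's single running-max loop (which rebuilds/extends a candidate-name list)
-- by a two-pass decomposition: max score first, then lexicographic min of names attaining it (objective: simpler).

-- shared validity test: dates[0] != 'No pattern found' and dates[0] != "Invalid date"
def pvP (d : String × Int) : Bool := d.1 != "No pattern found" && d.1 != "Invalid date"

-- ===== PORT A =====
-- the body of A's second loop, verbatim
def pvStepA (st : Int × List String) (dates : String × Int) : Int × List String :=
  if dates.2 > st.1 then (dates.2, [dates.1])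
  else if dates.2 = st.1 then (dates.2, st.2 ++ [dates.1])
  else st

def filter_dates (dates_list : List (String × Int)) : Option String × Int :=
  let valid_list := dates_list.foldl
    (fun acc dates => if pvP dates then acc ++ [dates] else acc) []
  let st := valid_list.foldl pvStepA (-1000000000, [])
  if st.2.length = 0 then (none, -1)
  else (PySem.List.min? st.2 (fun x => x), st.1)

-- ===== PORT B =====
def filter_dates_alt (dates_list : List (String × Int)) : Option String × Int :=
  let valid := dates_list.filter pvP
  if valid = [] then (none, -1)
  else
    -- max(...) / min(...): the .getD defaults are unreachable (valid ≠ [], and the max is attained)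
    let m := (PySem.List.max? (valid.map (fun d => d.2)) (fun x => x)).getD (-1)
    ((PySem.List.min? ((valid.filter (fun d => d.2 == m)).map (fun d => d.1)) (fun x => x)), m)

-- ===== PRECONDITION & SPEC =====
-- When the valid list is non-empty but every valid score is strictly below A's sentinel
-- -1000000000, A's running max never fires and it returns (None, -1) as if nothing were
-- valid, while B returns the intended (min name with max score, max score).
def D_filter_dates (dates_list : List (String × Int)) : Prop :=
  (∃ d ∈ dates_list, (d.1 != "No pattern found" && d.1 != "Invalid date") = true) ∧
  (∀ d ∈ dates_list, (d.1 != "No pattern found" && d.1 != "Invalid date") = true → d.2 < -1000000000)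
instance (dates_list : List (String × Int)) : Decidable (D_filter_dates dates_list) := by
  unfold D_filter_dates; infer_instance

def Spec_filter_dates (dates_list : List (String × Int)) (out : Option String × Int) : Prop :=
  ¬ D_filter_dates dates_list → out = filter_dates_alt dates_list
instance (dates_list : List (String × Int)) (out : Option String × Int) : Decidable (Spec_filter_dates dates_list out) := by unfold Spec_filter_dates; infer_instance

def pvDiffWitness_filter_dates : (List (String × Int)) := [("a", -2000000000)]
def pvDiffWitnessOut_filter_dates : (Option String × Int) × (Option String × Int) :=
  ((none, -1), (some "a", -2000000000))

-- ===== CLAIM (what is proved, stated in full; the proofs are below) =====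
def Claim_unchanged_filter_dates : Prop := ∀ (dates_list : List (String × Int)), Dom_filter_dates dates_list → Spec_filter_dates dates_list (filter_dates dates_list)
def Claim_changed_filter_dates : Prop := Dom_filter_dates (pvDiffWitness_filter_dates) ∧ D_filter_dates (pvDiffWitness_filter_dates) ∧ filter_dates (pvDiffWitness_filter_dates) = pvDiffWitnessOut_filter_dates.1 ∧ filter_dates_alt (pvDiffWitness_filter_dates) = pvDiffWitnessOut_filter_dates.2 ∧ pvDiffWitnessOut_filter_dates.1 ≠ pvDiffWitnessOut_filter_dates.2
def Claim_exact_filter_dates : Prop := ∀ (dates_list : List (String × Int)), Dom_filter_dates dates_list → D_filter_dates dates_list → filter_dates dates_list ≠ filter_dates_alt dates_list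

-- ===== LEMMAS AND PROOFS =====

def pvMaxf (a : Int) (d : String × Int) : Int := max a d.2

def pvNames (M : Int) (V : List (String × Int)) : List String :=
  (V.filter (fun d => d.2 == M)).map (fun d => d.1)

lemma pvNames_cons (M : Int) (d : String × Int) (t : List (String × Int)) :
    pvNames M (d :: t) = (if d.2 = M then [d.1] else []) ++ pvNames M t := by
  by_cases h : d.2 = M
  · simp [pvNames, h]
  · simp [pvNames, h]

lemma pvFoldlMaxInit : ∀ (t : List (String × Int)) (a b : Int),
    t.foldl pvMaxf (max a b) = max a (t.foldl pvMaxf b) := by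
  intro t
  induction t with
  | nil => intro a b; simp
  | cons d t ih =>
      intro a b
      simp only [List.foldl_cons, pvMaxf, max_assoc]
      exact ih a (max b d.2)

lemma pvFoldlMaxGe : ∀ (t : List (String × Int)) (a : Int), a ≤ t.foldl pvMaxf a := by
  intro t
  induction t with
  | nil => intro a; simp
  | cons d t ih =>
      intro a
      calc a ≤ max a d.2 := le_max_left _ _
        _ ≤ t.foldl pvMaxf (max a d.2) := ih _

lemma pvFoldlMaxAttained : ∀ (t : List (String × Int)) (a : Int),
    t.foldl pvMaxf a = a ∨ ∃ d ∈ t, d.2 = t.foldl pvMaxf a := by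
  intro t
  induction t with
  | nil => intro a; left; rfl
  | cons d t ih =>
      intro a
      simp only [List.foldl_cons, pvMaxf]
      by_cases h : d.2 ≤ a
      · rw [max_eq_left h]
        rcases ih a with h1 | ⟨e, he, h2⟩
        · left; exact h1
        · right; exact ⟨e, List.mem_cons_of_mem _ he, h2⟩
      · rw [max_eq_right (by omega)]
        rcases ih d.2 with h1 | ⟨e, he, h2⟩
        · right; exact ⟨d, List.mem_cons_self .., h1.symm⟩
        · right; exact ⟨e, List.mem_cons_of_mem _ he, h2⟩

lemma pvFoldlMaxMem : ∀ (t : List (String × Int)) (a : Int) (e : String × Int),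
    e ∈ t → e.2 ≤ t.foldl pvMaxf a := by
  intro t
  induction t with
  | nil => intro a e h; exact absurd h (List.not_mem_nil)
  | cons d t ih =>
      intro a e h
      rcases List.mem_cons.mp h with h1 | h1
      · subst h1
        simp only [List.foldl_cons, pvMaxf]
        calc e.2 ≤ max a e.2 := le_max_right _ _
          _ ≤ t.foldl pvMaxf (max a e.2) := pvFoldlMaxGe t _
      · simpa only [List.foldl_cons] using ih (pvMaxf a d) e h1

-- characterization of A's second loop
lemma pvLoopChar : ∀ (V : List (String × Int)) (m : Int) (r : List String),
    V.foldl pvStepA (m, r) =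
      (V.foldl pvMaxf m,
       (if V.foldl pvMaxf m = m then r else []) ++ pvNames (V.foldl pvMaxf m) V) := by
  intro V
  induction V with
  | nil => intro m r; simp [pvNames]
  | cons d t ih =>
      intro m r
      have hge : ∀ (a : Int), a ≤ t.foldl pvMaxf a := pvFoldlMaxGe t
      simp only [List.foldl_cons, pvStepA, pvMaxf]
      rcases lt_trichotomy m d.2 with h | h | h
      · -- d.2 > m : reset
        simp only [gt_iff_lt, if_pos h, show max m d.2 = d.2 from max_eq_right h.le, ih,
          pvNames_cons]
        have hM : d.2 ≤ t.foldl pvMaxf d.2 := hge d.2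
        rw [if_neg (show t.foldl pvMaxf d.2 ≠ m by omega)]
        by_cases hd : t.foldl pvMaxf d.2 = d.2
        · rw [if_pos hd, if_pos hd.symm]; simp
        · rw [if_neg hd, if_neg (fun hc => hd hc.symm)]; simp
      · -- d.2 = m : append
        subst h
        rw [if_neg (lt_irrefl d.2), if_pos rfl]
        simp only [max_self, ih, pvNames_cons]
        by_cases hd : t.foldl pvMaxf d.2 = d.2
        · rw [if_pos hd, if_pos hd, if_pos hd.symm]; simp
        · rw [if_neg hd, if_neg hd, if_neg (fun hc => hd hc.symm)]; simp
      · -- d.2 < m : skip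
        simp only [gt_iff_lt, if_neg (show ¬ m < d.2 by omega),
          if_neg (show ¬ d.2 = m by omega), show max m d.2 = m from max_eq_left h.le, ih,
          pvNames_cons]
        have hM : m ≤ t.foldl pvMaxf m := hge m
        rw [if_neg (show ¬ d.2 = t.foldl pvMaxf m by omega)]
        simp

-- main case analysis, shared by the unchanged and exact theorems
lemma pvMain (dates_list : List (String × Int)) :
    (¬ D_filter_dates dates_list → filter_dates dates_list = filter_dates_alt dates_list) ∧
    (D_filter_dates dates_list → filter_dates dates_list ≠ filter_dates_alt dates_list) := by
  have hA : filter_dates dates_list =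
      (if (pvNames ((dates_list.filter pvP).foldl pvMaxf (-1000000000)) (dates_list.filter pvP)).length = 0
       then (none, -1)
       else (PySem.List.min?
               (pvNames ((dates_list.filter pvP).foldl pvMaxf (-1000000000)) (dates_list.filter pvP))
               (fun x => x),
             (dates_list.filter pvP).foldl pvMaxf (-1000000000))) := by
    show (if ((dates_list.foldl (fun acc dates => if pvP dates then acc ++ [dates] else acc) []).foldl pvStepA (-1000000000, [])).2.length = 0
          then ((none : Option String), (-1 : Int))
          else (PySem.List.min? ((dates_list.foldl (fun acc dates => if pvP dates then acc ++ [dates] else acc) []).foldl pvStepA (-1000000000, [])).2 (fun x => x),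
                ((dates_list.foldl (fun acc dates => if pvP dates then acc ++ [dates] else acc) []).foldl pvStepA (-1000000000, [])).1)) = _
    rw [PySem.List.foldl_append_if_eq_filter, List.nil_append, pvLoopChar]
    simp [ite_self]
  have hDP : D_filter_dates dates_list ↔
      ((∃ d ∈ dates_list, pvP d = true) ∧ (∀ d ∈ dates_list, pvP d = true → d.2 < -1000000000)) := by
    unfold D_filter_dates pvP; exact Iff.rfl
  have hB : filter_dates_alt dates_list =
      (if dates_list.filter pvP = [] then ((none : Option String), (-1 : Int))
       else (PySem.List.min?
               (((dates_list.filter pvP).filter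
                   (fun d => d.2 == (PySem.List.max? ((dates_list.filter pvP).map (fun d => d.2)) (fun x => x)).getD (-1))).map
                 (fun d => d.1)) (fun x => x),
             (PySem.List.max? ((dates_list.filter pvP).map (fun d => d.2)) (fun x => x)).getD (-1))) := rfl
  rw [hA, hB]
  cases hV : dates_list.filter pvP with
  | nil =>
      constructor
      · intro _
        simp [pvNames]
      · intro hD
        obtain ⟨d, hd, hpd⟩ := (hDP.mp hD).1
        have : d ∈ dates_list.filter pvP := List.mem_filter.mpr ⟨hd, hpd⟩
        rw [hV] at this
        exact absurd this (List.not_mem_nil)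
  | cons v vs =>
      have hvfilter : ∀ d ∈ v :: vs, pvP d = true ∧ d ∈ dates_list := by
        intro d hd
        rw [← hV, List.mem_filter] at hd
        exact ⟨hd.2, hd.1⟩
      set Mt := vs.foldl pvMaxf v.2 with hMt
      have hattain : ∃ d ∈ v :: vs, d.2 = Mt := by
        rcases pvFoldlMaxAttained vs v.2 with h | ⟨e, he, h2⟩
        · exact ⟨v, List.mem_cons_self .., h.symm⟩
        · exact ⟨e, List.mem_cons_of_mem _ he, h2⟩
      obtain ⟨dm, hdm, hdm2⟩ := hattain
      have hdom : ∀ e ∈ v :: vs, e.2 ≤ Mt := by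
        intro e he
        rcases List.mem_cons.mp he with h1 | h1
        · rw [h1, hMt]; exact pvFoldlMaxGe vs v.2
        · rw [hMt]; exact pvFoldlMaxMem vs v.2 e h1
      have hfold : (v :: vs).foldl pvMaxf (-1000000000) = max (-1000000000) Mt := by
        simp only [List.foldl_cons, hMt]
        exact pvFoldlMaxInit vs (-1000000000) v.2
      have hBm : (PySem.List.max? (((v :: vs) : List (String × Int)).map (fun d => d.2)) (fun x => x)).getD (-1) = Mt := by
        simp only [List.map_cons, PySem.List.max?_id_cons, Option.getD_some, hMt]
        rw [List.foldl_map]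
        rfl
      rw [if_neg (show ¬ ((v :: vs : List (String × Int)) = []) by simp)]
      simp only [hBm, hfold]
      constructor
      · -- outside D_ : some valid score is ≥ -1000000000, hence Mt ≥ -1000000000
        intro hnD
        have hMtge : -1000000000 ≤ Mt := by
          by_contra hc
          push Not at hc
          apply hnD
          apply hDP.mpr
          refine ⟨⟨v, (hvfilter v (List.mem_cons_self ..)).2, (hvfilter v (List.mem_cons_self ..)).1⟩, ?_⟩
          intro d hd hpd
          have hmem : d ∈ v :: vs := by rw [← hV]; exact List.mem_filter.mpr ⟨hd, hpd⟩
          have := hdom d hmem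
          omega
        rw [max_eq_right hMtge]
        rw [if_neg (by
          simp only [List.length_eq_zero_iff]
          intro hc
          have hmem : dm ∈ (v :: vs : List (String × Int)).filter (fun d => d.2 == Mt) :=
            List.mem_filter.mpr ⟨hdm, by simp [hdm2]⟩
          have : dm.1 ∈ pvNames Mt (v :: vs) := List.mem_map_of_mem hmem
          rw [hc] at this
          exact absurd this (List.not_mem_nil))]
        simp [pvNames]
      · -- inside D_ : every valid score < -1000000000, so A's loop keeps its sentinel
        intro hD
        have hall := (hDP.mp hD).2
        have hallv : ∀ d ∈ v :: vs, d.2 < -1000000000 := by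
          intro d hd
          exact hall d (hvfilter d hd).2 (hvfilter d hd).1
        have hMtlt : Mt < -1000000000 := by rw [← hdm2]; exact hallv dm hdm
        rw [max_eq_left (le_of_lt hMtlt)]
        have hempty : pvNames (-1000000000) (v :: vs) = [] := by
          simp only [pvNames, List.map_eq_nil_iff, List.filter_eq_nil_iff]
          intro d hd
          simp only [beq_iff_eq]
          have := hallv d hd
          omega
        rw [if_pos (by rw [hempty]; rfl)]
        intro hc
        have := congrArg Prod.snd hc
        simp only at this
        omega

-- ===== VERDICT (by name: the statement is the Claim_ definition above) =====
theorem filter_dates_spec : Claim_unchanged_filter_dates := by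
  intro dates_list _ hnD
  exact (pvMain dates_list).1 hnD

theorem filter_dates_changed : Claim_changed_filter_dates := by
  unfold Claim_changed_filter_dates; decide

theorem filter_dates_tight : Claim_exact_filter_dates := by
  intro dates_list _ hD
  exact (pvMain dates_list).2 hD
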